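-- pv_equiv track=rewrite | github.com/ConradoJuncos/AdventOfCode2024 | day5/day5.py | order_updates
-- ===== SOURCE A (Python) =====
-- def order_updates(rules, updates):
--     ordered = []
--     for update in updates:
--         graph = {page: [] for page in update}
--         counter = {page: 0 for page in update}
--         relevant_rules = []
--         relevant_rules += [rule for rule in rules if rule[0] in update and rule[1] in update]
--
--         for i in relevant_rules:
--             x = i[0]
--             y = i[1]
--             graph[x].append(y)
--             counter[x] = len(graph[x])
--         upd = []
--
--         for key, value in counter.items():
--             max_value = max(counter.values())
--             max_key = -1
--             for k, v in counter.items():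
--                 if v == max_value:
--                     max_key = k
--                     break
--             upd.append(max_key)
--             counter[max_key] = -1
--         ordered.append(tuple(upd))
--         upd = []
--     return ordered
-- ===== SOURCE B (Python) =====
-- def order_updates(rules, updates):
--     ordered = []
--     for update in updates:
--         pages = set(update)
--         counter = {page: 0 for page in update}
--         for x, y in rules:
--             if x in pages and y in pages:
--                 counter[x] += 1
--         ordered.append(tuple(sorted(counter, key=counter.get, reverse=True)))
--     return ordered
-- ===== Notes on version B (the rewrite author's own statement) =====
-- stated objective: faster
-- what changed: Per update, A pre-filters rules with O(n) list membership, builds adjacency lists to derive counts, then repeatedly rescans the whole counter dict for the maximum (quadratic selection); B counts rule left-endpoints directly in one pass over the rules using a set for membership and emits the pages via one stable descending sort by count.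
import Mathlib
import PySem

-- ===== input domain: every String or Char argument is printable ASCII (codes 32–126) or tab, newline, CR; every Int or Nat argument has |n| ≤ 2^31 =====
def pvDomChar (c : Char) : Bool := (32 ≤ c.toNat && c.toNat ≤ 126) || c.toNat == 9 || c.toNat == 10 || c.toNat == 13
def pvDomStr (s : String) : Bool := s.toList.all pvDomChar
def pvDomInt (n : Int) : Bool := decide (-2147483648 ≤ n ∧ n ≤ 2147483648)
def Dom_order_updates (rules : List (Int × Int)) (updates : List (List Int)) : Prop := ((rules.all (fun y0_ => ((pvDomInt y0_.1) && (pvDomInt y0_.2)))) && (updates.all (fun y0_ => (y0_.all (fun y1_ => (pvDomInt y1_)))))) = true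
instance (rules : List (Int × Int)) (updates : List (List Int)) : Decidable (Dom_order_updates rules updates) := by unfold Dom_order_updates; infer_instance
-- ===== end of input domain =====

-- B replaces A's per-update graph build over pre-filtered rules and its repeated-max selection
-- loop by one counting pass over the rules (set-membership filter) followed by a stable
-- descending sort of the pages by count — same return value by the theorem below.

-- ===== PORT A =====
def order_updates (rules : List (Int × Int)) (updates : List (List Int)) : List (List Int) :=
  updates.foldl (fun ordered update =>
    let graph : PySem.Dict Int (List Int) :=
      update.foldl (fun d page => d.insert page []) PySem.Dict.empty
    let counter : PySem.Dict Int Int :=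
      update.foldl (fun d page => d.insert page 0) PySem.Dict.empty
    let relevant_rules : List (Int × Int) :=
      [] ++ rules.filter (fun rule => update.contains rule.1 && update.contains rule.2)
    let gc :=
      relevant_rules.foldl (fun (st : PySem.Dict Int (List Int) × PySem.Dict Int Int) i =>
        let x := i.1
        let y := i.2
        -- graph[x].append(y): x is a key of graph whenever this runs (x ∈ update), so modify is exact
        let g := st.1.modify x [] (fun l => l ++ [y])
        (g, st.2.insert x (PySem.List.len (g.getD x []))))
        (graph, counter)
    let sel :=
      -- for key, value in counter.items(): the body uses neither key nor value and the key set
      -- never changes, so folding over the initial items list is exact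
      gc.2.items.foldl (fun (st : PySem.Dict Int Int × List Int) _kv =>
        -- max(counter.values()): the dict is nonempty whenever this body runs, so the getD 0 default is unreachable
        let max_value := (PySem.List.max? st.1.values (fun v => v)).getD 0
        let max_key := (((st.1.items).find? (fun kv => kv.2 == max_value)).map Prod.fst).getD (-1)
        (st.1.insert max_key (-1), st.2 ++ [max_key]))
        (gc.2, [])
    ordered ++ [sel.2]) []

-- ===== PORT B =====
def order_updates_alt (rules : List (Int × Int)) (updates : List (List Int)) : List (List Int) :=
  updates.map (fun update =>
    let pages : PySem.Set Int := PySem.Set.ofList update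
    let counter : PySem.Dict Int Int :=
      update.foldl (fun d page => d.insert page 0) PySem.Dict.empty
    let counter2 :=
      rules.foldl (fun d r =>
        if PySem.Set.contains pages r.1 && PySem.Set.contains pages r.2
        then d.modify r.1 0 (fun c => c + 1) else d) counter
    PySem.List.sorted counter2.keys (fun k => counter2.getD k 0) true)

-- ===== PRECONDITION & SPEC =====
def Spec_order_updates (rules : List (Int × Int)) (updates : List (List Int)) (out : List (List Int)) : Prop := out = order_updates_alt rules updates
instance (rules : List (Int × Int)) (updates : List (List Int)) (out : List (List Int)) : Decidable (Spec_order_updates rules updates out) := by unfold Spec_order_updates; infer_instance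

-- ===== CLAIM (what is proved, stated in full; the proofs are below) =====
def Claim_equal_order_updates : Prop := ∀ (rules : List (Int × Int)) (updates : List (List Int)), Dom_order_updates rules updates → Spec_order_updates rules updates (order_updates rules updates)

-- ===== LEMMAS AND PROOFS =====
theorem pv_idx_left {K P Q : List Int} {m y : Int}
    (h : K = P ++ m :: Q) (hnd : K.Nodup) (hy : y ∈ P) : K.idxOf y < K.idxOf m := by
  subst h
  have hm : m ∉ P := by
    rw [List.nodup_append] at hnd
    intro hmem; exact hnd.2.2 m hmem m List.mem_cons_self rfl
  rw [List.idxOf_append_of_mem hy, List.idxOf_append, if_neg hm, List.idxOf_cons_self]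
  have := List.idxOf_lt_length_of_mem hy
  omega
theorem pv_idx_right {K P Q : List Int} {m k : Int}
    (h : K = P ++ m :: Q) (hnd : K.Nodup) (hk : k ∈ Q) : K.idxOf m < K.idxOf k := by
  subst h
  rw [List.nodup_append] at hnd
  have hmP : m ∉ P := fun hmem => hnd.2.2 m hmem m List.mem_cons_self rfl
  have hkP : k ∉ P := fun hmem => hnd.2.2 k hmem k (List.mem_cons_of_mem _ hk) rfl
  have hkm : k ≠ m := by
    rintro rfl; exact (List.nodup_cons.mp hnd.2.1).1 hk
  rw [List.idxOf_append, if_neg hmP, List.idxOf_append, if_neg hkP,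
    List.idxOf_cons_self, List.idxOf_cons_ne _ (fun e => hkm e.symm)]
  omega

def pvR (K : List Int) (v : Int → Int) (a b : Int) : Prop :=
  v b < v a ∨ (v a = v b ∧ K.idxOf a < K.idxOf b)

theorem pv_insertBy_pairwise {v : Int → Int} {r : Int → Int → Prop} :
    ∀ (acc : List Int) (x : Int), acc.Pairwise r →
    (∀ y ∈ acc, ¬ (v y < v x) → r y x) →
    (∀ y ∈ acc, v y < v x → r x y) →
    (∀ y z, v y < v x → r y z → r x z) →
    (PySem.List.insertBy (fun a b => decide (v b < v a)) x acc).Pairwise r := by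
  intro acc
  induction acc with
  | nil => intro x _ _ _ _; simp [PySem.List.insertBy]
  | cons y ys ih =>
    intro x hp h1 h2 h4
    rw [PySem.List.insertBy.eq_2]
    by_cases hxy : v y < v x
    · rw [if_pos (by simpa using hxy)]
      rcases List.pairwise_cons.mp hp with ⟨hyys, hpys⟩
      refine List.pairwise_cons.mpr ⟨?_, hp⟩
      intro z hz
      rcases List.mem_cons.mp hz with rfl | hz'
      · exact h2 _ (List.mem_cons_self) hxy
      · exact h4 y z hxy (hyys z hz')
    · rw [if_neg (by simpa using hxy)]
      rcases List.pairwise_cons.mp hp with ⟨hyys, hpys⟩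
      refine List.pairwise_cons.mpr ⟨?_, ?_⟩
      · intro z hz
        rcases (PySem.List.insertBy_mem_iff _ _ _ _).mp hz with rfl | hz'
        · exact h1 y (List.mem_cons_self) hxy
        · exact hyys z hz'
      · exact ih x hpys (fun a ha hn => h1 a (List.mem_cons_of_mem _ ha) hn)
          (fun a ha hn => h2 a (List.mem_cons_of_mem _ ha) hn) h4

theorem pv_foldl_ins (K : List Int) (v : Int → Int) (hnd : K.Nodup) :
    ∀ (P Q : List Int), K = P ++ Q →
    (P.foldl (fun acc x => PySem.List.insertBy (fun a b => decide (v b < v a)) x acc) []).Pairwise (pvR K v) ∧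
    (P.foldl (fun acc x => PySem.List.insertBy (fun a b => decide (v b < v a)) x acc) []).Perm P := by
  intro P
  induction P using List.reverseRecOn with
  | nil => intro Q h; simp
  | append_singleton P x ih =>
    intro Q h
    have h' : K = P ++ (x :: Q) := by simpa using h
    obtain ⟨hpw, hperm⟩ := ih (x :: Q) h'
    rw [List.foldl_append]
    simp only [List.foldl_cons, List.foldl_nil]
    set acc := P.foldl (fun acc x => PySem.List.insertBy (fun a b => decide (v b < v a)) x acc) [] with hacc
    have hmem : ∀ y ∈ acc, y ∈ P := fun y hy => hperm.mem_iff.mp hy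
    constructor
    · apply pv_insertBy_pairwise acc x hpw
      · intro y hy hn
        rcases lt_or_eq_of_le (not_lt.mp hn) with hlt | heq
        · exact Or.inl hlt
        · exact Or.inr ⟨heq.symm, pv_idx_left h' hnd (hmem y hy)⟩
      · intro y hy hlt; exact Or.inl hlt
      · intro y z hlt hr
        rcases hr with hr | ⟨hr, _⟩
        · exact Or.inl (lt_trans hr hlt)
        · exact Or.inl (hr ▸ hlt)
    · refine (PySem.List.insertBy_perm _ _ _).trans ?_
      exact (hperm.cons x).trans (List.perm_append_singleton x P).symm

theorem pv_pair_form {K : List Int} {w : Int → Int} {p : Int × Int}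
    (hp : p ∈ K.map (fun k => (k, w k))) : p.1 ∈ K ∧ p = (p.1, w p.1) := by
  rcases List.mem_map.mp hp with ⟨a, ha, rfl⟩
  exact ⟨ha, rfl⟩

theorem pv_sel_inv (K : List Int) (v : Int → Int) (hndK : K.Nodup) (hv : ∀ k ∈ K, 0 ≤ v k) :
    ∀ (todo : List (Int × Int)) (S : List Int) (d : PySem.Dict Int Int),
    d.items = K.map (fun k => (k, if k ∈ S then -1 else v k)) →
    S.Nodup → (∀ a ∈ S, a ∈ K) → S.length + todo.length = K.length →
    S.Pairwise (pvR K v) →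
    (∀ a ∈ S, ∀ k ∈ K, k ∉ S → pvR K v a k) →
    (todo.foldl (fun (st : PySem.Dict Int Int × List Int) _kv =>
        let max_value := (PySem.List.max? st.1.values (fun v => v)).getD 0
        let max_key := (((st.1.items).find? (fun kv => kv.2 == max_value)).map Prod.fst).getD (-1)
        (st.1.insert max_key (-1), st.2 ++ [max_key]))
        (d, S)).2.Nodup ∧
      (∀ a ∈ (todo.foldl (fun (st : PySem.Dict Int Int × List Int) _kv =>
        let max_value := (PySem.List.max? st.1.values (fun v => v)).getD 0
        let max_key := (((st.1.items).find? (fun kv => kv.2 == max_value)).map Prod.fst).getD (-1)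
        (st.1.insert max_key (-1), st.2 ++ [max_key]))
        (d, S)).2, a ∈ K) ∧
      (todo.foldl (fun (st : PySem.Dict Int Int × List Int) _kv =>
        let max_value := (PySem.List.max? st.1.values (fun v => v)).getD 0
        let max_key := (((st.1.items).find? (fun kv => kv.2 == max_value)).map Prod.fst).getD (-1)
        (st.1.insert max_key (-1), st.2 ++ [max_key]))
        (d, S)).2.length = K.length ∧
      ((todo.foldl (fun (st : PySem.Dict Int Int × List Int) _kv =>
        let max_value := (PySem.List.max? st.1.values (fun v => v)).getD 0
        let max_key := (((st.1.items).find? (fun kv => kv.2 == max_value)).map Prod.fst).getD (-1)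
        (st.1.insert max_key (-1), st.2 ++ [max_key]))
        (d, S)).2.Pairwise (pvR K v)) := by
  intro todo
  induction todo with
  | nil =>
    intro S d hd hndS hSK hlen hpw hfr
    simp only [List.foldl_nil]
    exact ⟨hndS, hSK, by simpa using hlen, hpw⟩
  | cons t todo' ih =>
    intro S d hd hndS hSK hlen hpw hfr
    have hlt : S.length < K.length := by simp at hlen; omega
    have hex : ∃ u, u ∈ K ∧ u ∉ S := by
      by_contra hno
      have hsub : K ⊆ S := fun k hk => by
        by_cases h : k ∈ S
        · exact h
        · exact absurd ⟨k, hk, h⟩ hno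
      have := (hndK.subperm hsub).length_le
      omega
    obtain ⟨u, huK, huS⟩ := hex
    have hvals : d.values = K.map (fun k => if k ∈ S then -1 else v k) := by
      show d.items.map Prod.snd = _
      rw [hd, List.map_map]; rfl
    obtain ⟨M, hM⟩ : ∃ M, PySem.List.max? d.values (fun v => v) = some M := by
      cases hMc : PySem.List.max? d.values (fun v => v) with
      | none =>
        rw [PySem.List.max?_eq_none_iff, hvals, List.map_eq_nil_iff] at hMc
        subst hMc; simp at huK
      | some M => exact ⟨M, rfl⟩
    have hMmax : ∀ k ∈ K, (if k ∈ S then -1 else v k) ≤ M := by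
      intro k hk
      have := PySem.List.max?_isMax hM ((fun k => if k ∈ S then -1 else v k) k)
        (by rw [hvals]; exact List.mem_map_of_mem hk)
      simpa using this
    have hM0 : 0 ≤ M := le_trans (by simpa [huS] using hv u huK) (hMmax u huK)
    obtain ⟨b, hb⟩ : ∃ b, d.items.find? (fun kv => kv.2 == M) = some b := by
      rw [← Option.isSome_iff_exists, List.find?_isSome]
      have hMv : M ∈ d.values := PySem.List.max?_mem hM
      rw [hvals] at hMv
      rcases List.mem_map.mp hMv with ⟨k, hk, hwk⟩
      exact ⟨(k, if k ∈ S then -1 else v k), by rw [hd]; exact List.mem_map_of_mem hk, by simp [hwk]⟩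
    obtain ⟨hpb, as, bs, hsplit, has⟩ := List.find?_eq_some_iff_append.mp hb
    rw [hd] at hsplit
    have hbmem : b ∈ d.items := List.mem_of_find?_eq_some hb
    rw [hd] at hbmem
    obtain ⟨hb1K, hbform⟩ := pv_pair_form hbmem
    have hb2 : b.2 = M := by simpa using hpb
    have hsnd : (if b.1 ∈ S then -1 else v b.1) = M := by
      have := congrArg Prod.snd hbform; rw [hb2] at this; exact this.symm
    have hmS : b.1 ∉ S := by
      intro hin; rw [if_pos hin] at hsnd; omega
    have hvm : v b.1 = M := by rwa [if_neg hmS] at hsnd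
    have hKdec : K = as.map Prod.fst ++ b.1 :: bs.map Prod.fst := by
      have h1 := congrArg (List.map Prod.fst) hsplit
      rw [List.map_map] at h1
      rw [show (Prod.fst ∘ fun k => (k, if k ∈ S then -1 else v k)) = id from rfl, List.map_id,
        List.map_append, List.map_cons] at h1
      exact h1
    -- invariants for the new state
    have hcont : d.contains b.1 = true := by
      rw [PySem.Dict.contains_iff_mem_keys]
      show b.1 ∈ d.items.map Prod.fst
      rw [hd, List.map_map]
      simpa using hb1K
    have hd' : (d.insert b.1 (-1)).items
        = K.map (fun k => (k, if k ∈ S ++ [b.1] then -1 else v k)) := by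
      rw [PySem.Dict.items_insert_of_contains d (-1) hcont, hd, List.map_map]
      apply List.map_congr_left
      intro k hk
      by_cases hkb : k = b.1
      · subst hkb; simp
      · simp [hkb]
    have hndS' : (S ++ [b.1]).Nodup := by
      rw [List.nodup_append]
      refine ⟨hndS, List.nodup_singleton _, ?_⟩
      intro a ha c hc
      rw [List.mem_singleton] at hc
      subst hc
      intro heq
      exact hmS (heq ▸ ha)
    have hSK' : ∀ a ∈ S ++ [b.1], a ∈ K := by
      intro a ha
      rcases List.mem_append.mp ha with h | h
      · exact hSK a h
      · simpa using (List.mem_singleton.mp h) ▸ hb1K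
    have hlen' : (S ++ [b.1]).length + todo'.length = K.length := by
      simp at hlen ⊢; omega
    have hpw' : (S ++ [b.1]).Pairwise (pvR K v) := by
      rw [List.pairwise_append]
      exact ⟨hpw, List.pairwise_singleton _ _,
        fun a ha x hx => (List.mem_singleton.mp hx) ▸ hfr a ha b.1 hb1K hmS⟩
    have hfr' : ∀ a ∈ S ++ [b.1], ∀ k ∈ K, k ∉ S ++ [b.1] → pvR K v a k := by
      intro a ha k hk hk'
      have hkS : k ∉ S := fun h => hk' (List.mem_append.mpr (Or.inl h))
      have hkb : k ≠ b.1 := fun h => hk' (List.mem_append.mpr (Or.inr (by simp [h])))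
      rcases List.mem_append.mp ha with h | h
      · exact hfr a h k hk hkS
      · have hab : a = b.1 := List.mem_singleton.mp h
        subst hab
        have hkle : v k ≤ M := by
          have := hMmax k hk; rwa [if_neg hkS] at this
        rcases lt_or_eq_of_le hkle with hlt2 | heq2
        · exact Or.inl (by omega)
        · refine Or.inr ⟨by omega, ?_⟩
          -- k has value M, so its pair is not in `as`; it must be in bs
          have hkbs : k ∈ bs.map Prod.fst := by
            have hkd : k ∈ as.map Prod.fst ∨ k ∈ bs.map Prod.fst := by
              rw [hKdec] at hk
              rcases List.mem_append.mp hk with h1 | h1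
              · exact Or.inl h1
              · rcases List.mem_cons.mp h1 with h2 | h2
                · exact absurd h2 hkb
                · exact Or.inr h2
            rcases hkd with h1 | h1
            · exfalso
              rcases List.mem_map.mp h1 with ⟨p, hpas, hp1⟩
              have hpmem : p ∈ K.map (fun k => (k, if k ∈ S then -1 else v k)) := by
                rw [hsplit]; exact List.mem_append.mpr (Or.inl hpas)
              obtain ⟨_, hpform⟩ := pv_pair_form hpmem
              have := has p hpas
              rw [hpform, hp1] at this
              simp [hkS, heq2] at this
            · exact h1
          exact pv_idx_right hKdec hndK hkbs
    simp only [List.foldl_cons, hM, hb, Option.getD_some, Option.map_some]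
    exact ih (S ++ [b.1]) (d.insert b.1 (-1)) hd' hndS' hSK' hlen' hpw' hfr'

theorem pvR_asymm {K : List Int} {v : Int → Int} {a b : Int}
    (h1 : pvR K v a b) (h2 : pvR K v b a) : False := by
  rcases h1 with h1 | ⟨e1, i1⟩ <;> rcases h2 with h2 | ⟨e2, i2⟩ <;> omega

theorem pv_sorted_pairwise (K : List Int) (v : Int → Int) (hnd : K.Nodup) :
    (PySem.List.sorted K v true).Pairwise (pvR K v) := by
  rw [PySem.List.sorted_rev_eq_foldl_insertBy]
  exact (pv_foldl_ins K v hnd K [] (by simp)).1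

theorem pv_select_eq_sorted (c : PySem.Dict Int Int) (hnd : c.keys.Nodup)
    (hnn : ∀ k ∈ c.keys, 0 ≤ c.getD k 0) :
    (c.items.foldl (fun (st : PySem.Dict Int Int × List Int) _kv =>
        let max_value := (PySem.List.max? st.1.values (fun v => v)).getD 0
        let max_key := (((st.1.items).find? (fun kv => kv.2 == max_value)).map Prod.fst).getD (-1)
        (st.1.insert max_key (-1), st.2 ++ [max_key]))
        (c, [])).2
    = PySem.List.sorted c.keys (fun k => c.getD k 0) true := by
  have hitems := PySem.Dict.items_eq_map_keys c hnd 0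
  have hd0 : c.items = c.keys.map (fun k => (k, if k ∈ ([]:List Int) then -1 else c.getD k 0)) := by
    simpa using hitems
  have hlen0 : ([]:List Int).length + c.items.length = c.keys.length := by
    rw [hitems]; simp
  obtain ⟨hnd', hsub, hlen, hpw⟩ := pv_sel_inv c.keys (fun k => c.getD k 0) hnd hnn
    c.items [] c hd0 (by simp) (by simp) hlen0 (by simp) (by simp)
  have hperm := (hnd'.subperm hsub).perm_of_length_le (by omega)
  have hsp := pv_sorted_pairwise c.keys (fun k => c.getD k 0) hnd
  have hsperm := PySem.List.sorted_perm c.keys (fun k => c.getD k 0) true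
  exact List.Perm.eq_of_pairwise (fun a b _ _ h1 h2 => (pvR_asymm h1 h2).elim)
    hpw hsp (hperm.trans hsperm.symm)

theorem pv_counts_eq (rel : List (Int × Int)) :
    ∀ (g : PySem.Dict Int (List Int)) (cA cB : PySem.Dict Int Int),
    (∀ r ∈ rel, cA.contains r.1 = true) →
    cA.keys = cB.keys →
    (∀ k, cA.getD k 0 = ((g.getD k []).length : Int)) →
    (∀ k, cA.getD k 0 = cB.getD k 0) →
    cA.keys.Nodup →
    (rel.foldl (fun (st : PySem.Dict Int (List Int) × PySem.Dict Int Int) i =>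
        let g := st.1.modify i.1 [] (fun l => l ++ [i.2])
        (g, st.2.insert i.1 (PySem.List.len (g.getD i.1 []))))
        (g, cA)).2
    = rel.foldl (fun d r => d.modify r.1 0 (fun c => c + 1)) cB := by
  induction rel with
  | nil =>
    intro g cA cB hc hk hg he hnd
    simp only [List.foldl_nil]
    apply PySem.Dict.ext
    rw [PySem.Dict.items_eq_map_keys cA hnd 0, PySem.Dict.items_eq_map_keys cB (hk ▸ hnd) 0, hk]
    exact List.map_congr_left (fun k _ => by rw [he k])
  | cons r rel' ih =>
    intro g cA cB hc hk hg he hnd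
    simp only [List.foldl_cons]
    have hcr : cA.contains r.1 = true := hc r List.mem_cons_self
    apply ih
    · intro s hs
      rw [PySem.Dict.contains_insert]
      simp [hc s (List.mem_cons_of_mem _ hs)]
    · rw [PySem.Dict.keys_insert_of_contains _ _ hcr, PySem.Dict.keys_modify, hk,
        PySem.Dict.keys_insert_of_contains]
      rw [PySem.Dict.contains_iff_mem_keys, ← hk, ← PySem.Dict.contains_iff_mem_keys]
      exact hcr
    · intro k
      by_cases hkr : k = r.1
      · subst hkr
        simp [PySem.List.len_eq]
      · simp only [PySem.Dict.getD_insert, PySem.Dict.getD_modify, if_neg hkr]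
        exact hg k
    · intro k
      by_cases hkr : k = r.1
      · subst hkr
        have h1 : cB.getD r.1 0 = ((g.getD r.1 []).length : Int) := (he r.1).symm.trans (hg r.1)
        simp [PySem.List.len_eq, h1]
      · simp only [PySem.Dict.getD_insert, PySem.Dict.getD_modify, if_neg hkr]
        exact he k
    · rwa [PySem.Dict.keys_insert_of_contains _ _ hcr]

theorem pv_getD_const {ν : Type} (u : List Int) (w : ν) :
    ∀ (d : PySem.Dict Int ν) (k : Int), d.getD k w = w →
    (u.foldl (fun d p => d.insert p w) d).getD k w = w := by
  induction u with
  | nil => intro d k h; simpa using h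
  | cons p u' ih =>
    intro d k h
    simp only [List.foldl_cons]
    apply ih
    rw [PySem.Dict.getD_insert]
    split_ifs <;> simp [h]

def pvInit0 (u : List Int) : PySem.Dict Int Int :=
  u.foldl (fun d page => d.insert page 0) PySem.Dict.empty
def pvInitG (u : List Int) : PySem.Dict Int (List Int) :=
  u.foldl (fun d page => d.insert page []) PySem.Dict.empty
def pvRel (rules : List (Int × Int)) (u : List Int) : List (Int × Int) :=
  [] ++ rules.filter (fun rule => u.contains rule.1 && u.contains rule.2)
def pvGC (rules : List (Int × Int)) (u : List Int) :
    PySem.Dict Int (List Int) × PySem.Dict Int Int :=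
  (pvRel rules u).foldl (fun (st : PySem.Dict Int (List Int) × PySem.Dict Int Int) i =>
      let g := st.1.modify i.1 [] (fun l => l ++ [i.2])
      (g, st.2.insert i.1 (PySem.List.len (g.getD i.1 []))))
    (pvInitG u, pvInit0 u)
def pvSelRes (c : PySem.Dict Int Int) : List Int :=
  (c.items.foldl (fun (st : PySem.Dict Int Int × List Int) _kv =>
      let max_value := (PySem.List.max? st.1.values (fun v => v)).getD 0
      let max_key := (((st.1.items).find? (fun kv => kv.2 == max_value)).map Prod.fst).getD (-1)
      (st.1.insert max_key (-1), st.2 ++ [max_key]))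
    (c, [])).2
def pvFA (rules : List (Int × Int)) (u : List Int) : List Int := pvSelRes (pvGC rules u).2
def pvCntB (rules : List (Int × Int)) (u : List Int) : PySem.Dict Int Int :=
  rules.foldl (fun d r =>
    if PySem.Set.contains (PySem.Set.ofList u) r.1 && PySem.Set.contains (PySem.Set.ofList u) r.2
    then d.modify r.1 0 (fun c => c + 1) else d) (pvInit0 u)
def pvFB (rules : List (Int × Int)) (u : List Int) : List Int :=
  PySem.List.sorted (pvCntB rules u).keys (fun k => (pvCntB rules u).getD k 0) true

theorem pv_per_update (rules : List (Int × Int)) (u : List Int) :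
    pvFA rules u = pvFB rules u := by
  have hzero : ∀ k, (pvInit0 u).getD k 0 = 0 := fun k =>
    pv_getD_const u 0 PySem.Dict.empty k (by simp [pysem])
  have hzg : ∀ k, (pvInitG u).getD k [] = [] := fun k =>
    pv_getD_const u ([] : List Int) PySem.Dict.empty k (by simp [pysem])
  have hkeys0 : (pvInit0 u).keys = PySem.Set.ofList u := by
    unfold pvInit0
    rw [PySem.Dict.keys_foldl_insert]
    rfl
  have hnd0 : (pvInit0 u).keys.Nodup := by
    unfold pvInit0
    exact PySem.Dict.nodup_keys_foldl_insert u (fun _ _ => 0) _ PySem.Dict.nodup_keys_empty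
  have hcnt : (pvGC rules u).2
      = (pvRel rules u).foldl (fun d r => d.modify r.1 0 (fun c => c + 1)) (pvInit0 u) := by
    unfold pvGC
    apply pv_counts_eq
    · intro r hr
      unfold pvRel at hr
      rw [List.nil_append] at hr
      have h1 := List.of_mem_filter hr
      rw [Bool.and_eq_true] at h1
      rw [PySem.Dict.contains_iff_mem_keys, hkeys0, PySem.Set.mem_ofList]
      simpa using h1.1
    · rfl
    · intro k
      rw [hzero k, hzg k]
      rfl
    · intro k; rfl
    · exact hnd0
  have hcB : pvCntB rules u
      = (pvRel rules u).foldl (fun d r => d.modify r.1 0 (fun c => c + 1)) (pvInit0 u) := by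
    unfold pvCntB pvRel
    rw [List.nil_append, ← List.foldl_filter]
    rw [List.filter_congr (fun r _ => by
      show (PySem.Set.contains (PySem.Set.ofList u) r.1 && PySem.Set.contains (PySem.Set.ofList u) r.2)
        = (u.contains r.1 && u.contains r.2)
      simp [pysem])]
  have hndc : ((pvRel rules u).foldl (fun d r => d.modify r.1 0 (fun c => c + 1)) (pvInit0 u)).keys.Nodup :=
    PySem.Dict.nodup_keys_foldl_modify_key (pvRel rules u) Prod.fst 0 (fun _ _ => fun x => x + 1) _ hnd0
  have hnnc : ∀ k ∈ ((pvRel rules u).foldl (fun d r => d.modify r.1 0 (fun c => c + 1)) (pvInit0 u)).keys,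
      0 ≤ ((pvRel rules u).foldl (fun d r => d.modify r.1 0 (fun c => c + 1)) (pvInit0 u)).getD k 0 := by
    intro k _
    have h2 : (pvRel rules u).foldl (fun d r => d.modify r.1 0 (fun c => c + 1)) (pvInit0 u)
        = ((pvRel rules u).map Prod.fst).foldl (fun d x => d.modify x 0 (fun c => c + 1)) (pvInit0 u) := by
      rw [List.foldl_map]
    rw [h2, PySem.Dict.getD_foldl_modify_add_one, hzero k]
    have := Int.natCast_nonneg (((pvRel rules u).map Prod.fst).count k)
    omega
  unfold pvFA pvFB
  rw [hcnt, hcB]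
  exact pv_select_eq_sorted _ hndc hnnc

theorem pv_main (rules : List (Int × Int)) (updates : List (List Int)) :
    order_updates rules updates = order_updates_alt rules updates := by
  have hA : order_updates rules updates
      = updates.foldl (fun acc u => acc ++ [pvFA rules u]) [] := rfl
  have hB : order_updates_alt rules updates = updates.map (pvFB rules) := rfl
  rw [hA, hB, PySem.List.foldl_append_singleton_eq_map, List.nil_append]
  exact List.map_congr_left (fun u _ => pv_per_update rules u)

-- ===== VERDICT (by name: the statement is the Claim_ definition above) =====
theorem order_updates_spec : Claim_equal_order_updates := by
  intro rules updates _
  unfold Spec_order_updates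
  exact pv_main rules updates
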